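-- pv_equiv track=rewrite | github.com/foxBMS/foxbms-2 | tests/axivion/rule_config_names.py | is_pascal_case
-- ===== SOURCE A (Python) =====
-- def is_pascal_case(name: str) -> bool:
--     """Checks whether a string is PascalCase or not"""
--     # any valid PascalCase word needs to start with an uppercase letter
--     if not name[0].upper() == name[0]:
--         return False
--
--     idx = []
--     for i, val in enumerate(name):
--         if val.isupper():
--             idx.append(i)
--     for i in range(1, len(idx)):
--         # if the difference between two indexes is 1, we are not seeing PascalCase
--         if idx[i] - idx[i - 1] == 1:
--             return False
--
--     # if we come here, the name is PascalCase
--     return True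
-- ===== SOURCE B (Python) =====
-- def is_pascal_case(name: str) -> bool:
--     """Checks whether a string is PascalCase or not"""
--     # any valid PascalCase word needs to start with an uppercase letter
--     if name[0].upper() != name[0]:
--         return False
--     # no two neighbouring characters may both be uppercase
--     return not any(a.isupper() and b.isupper() for a, b in zip(name, name[1:]))
-- ===== Notes on version B (the rewrite author's own statement) =====
-- stated objective: simpler
-- what changed: Replaces A's two-phase scheme (build a list of uppercase positions, then scan that list for consecutive indices) with a single direct pass over adjacent character pairs, maintaining no auxiliary index list.
import Mathlib
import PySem

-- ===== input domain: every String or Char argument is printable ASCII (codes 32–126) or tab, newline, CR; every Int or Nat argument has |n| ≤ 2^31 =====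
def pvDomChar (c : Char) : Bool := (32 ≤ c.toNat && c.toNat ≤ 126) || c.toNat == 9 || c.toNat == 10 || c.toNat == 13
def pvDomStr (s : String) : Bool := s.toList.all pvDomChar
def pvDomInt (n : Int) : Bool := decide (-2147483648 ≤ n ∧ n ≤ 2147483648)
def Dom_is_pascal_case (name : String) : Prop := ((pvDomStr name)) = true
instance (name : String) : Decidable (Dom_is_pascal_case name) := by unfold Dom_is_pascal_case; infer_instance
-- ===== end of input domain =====

-- B replaces A's uppercase-index list and index-difference scan by one direct pass over
-- adjacent character pairs (objective: simpler).

-- ===== PORT A =====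
-- A's second loop: 'for i in range(1, len(idx)): if idx[i] - idx[i-1] == 1: return False',
-- transcribed as the scan over consecutive entries of idx it performs.
def pvAdjOne : List Int → Bool
  | a :: b :: rest => if b - a == 1 then true else pvAdjOne (b :: rest)
  | _ => false

def is_pascal_case (name : String) : Bool :=
  match PySem.Str.pyGet? name 0 with
  | none => false   -- name[0] raises IndexError in Python; excluded by Pre_
  | some c =>
    if !(PySem.Chars.upperChar c == c) then false
    else
      let idx := (PySem.List.enumerate name.toList 0).foldl
        (fun acc iv => if PySem.Chars.isupper iv.2 then acc ++ [iv.1] else acc) []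
      if pvAdjOne idx then false else true

-- ===== PORT B =====
def is_pascal_case_alt (name : String) : Bool :=
  match PySem.Str.pyGet? name 0 with
  | none => false   -- name[0] raises IndexError in Python; excluded by Pre_
  | some c =>
    if PySem.Chars.upperChar c != c then false
    else   -- name[1:] on a string is exactly .toList.drop 1 (PySem.Chars.slice_from)
      !((name.toList.zip (name.toList.drop 1)).any
          fun p => PySem.Chars.isupper p.1 && PySem.Chars.isupper p.2)

-- ===== PRECONDITION & SPEC =====
-- Pre_ excludes only the empty string, on which A raises IndexError at name[0].
def Pre_is_pascal_case (name : String) : Prop := name ≠ ""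
instance (name : String) : Decidable (Pre_is_pascal_case name) := by unfold Pre_is_pascal_case; infer_instance
def pvWitness_is_pascal_case : String := "PascalCase"

def Spec_is_pascal_case (name : String) (out : Bool) : Prop := out = is_pascal_case_alt name
instance (name : String) (out : Bool) : Decidable (Spec_is_pascal_case name out) := by unfold Spec_is_pascal_case; infer_instance

-- ===== CLAIM (what is proved, stated in full; the proofs are below) =====
def Claim_equal_is_pascal_case : Prop := ∀ (name : String), Dom_is_pascal_case name → Pre_is_pascal_case name → Spec_is_pascal_case name (is_pascal_case name)

-- ===== LEMMAS AND PROOFS =====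

-- the uppercase indices of cs, counted from offset n (what A's first loop collects)
def pvUpIdx (n : Int) : List Char → List Int
  | [] => []
  | c :: cs => if PySem.Chars.isupper c then n :: pvUpIdx (n + 1) cs else pvUpIdx (n + 1) cs

theorem pvUpIdx_ge (cs : List Char) : ∀ (n m : Int), m ∈ pvUpIdx n cs → n ≤ m := by
  induction cs with
  | nil => intro n m h; simp [pvUpIdx] at h
  | cons c cs ih =>
    intro n m h
    by_cases hc : PySem.Chars.isupper c <;> simp [pvUpIdx, hc] at h
    · rcases h with h | h
      · omega
      · have := ih _ _ h; omega
    · have := ih _ _ h; omega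

theorem pvFoldl_upIdx (cs : List Char) : ∀ (n : Int) (acc : List Int),
    (PySem.List.enumerate cs n).foldl
      (fun acc iv => if PySem.Chars.isupper iv.2 then acc ++ [iv.1] else acc) acc
    = acc ++ pvUpIdx n cs := by
  induction cs with
  | nil => intro n acc; simp [PySem.List.enumerate_nil, pvUpIdx]
  | cons c cs ih =>
    intro n acc
    by_cases hc : PySem.Chars.isupper c <;>
      simp [PySem.List.enumerate_cons, pvUpIdx, hc, ih]

-- any two neighbouring characters both uppercase (B's single pass)
def pvAdjUp (cs : List Char) : Bool :=
  (cs.zip (cs.drop 1)).any fun p => PySem.Chars.isupper p.1 && PySem.Chars.isupper p.2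

theorem pvAdjOne_upIdx (cs : List Char) : ∀ (n : Int), pvAdjOne (pvUpIdx n cs) = pvAdjUp cs := by
  induction cs with
  | nil => intro n; simp [pvUpIdx, pvAdjOne, pvAdjUp]
  | cons c cs ih =>
    intro n
    by_cases hc : PySem.Chars.isupper c
    · cases cs with
      | nil => simp [pvUpIdx, hc, pvAdjOne, pvAdjUp]
      | cons d cs' =>
        by_cases hd : PySem.Chars.isupper d
        · simp [pvUpIdx, hc, hd, pvAdjOne, pvAdjUp]
        · -- d is not upper: the head of pvUpIdx (n+2) cs' (if any) is ≥ n+2, so the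
          -- first difference check of pvAdjOne fails and it recurses past n.
          have hrec : pvAdjOne (n :: pvUpIdx (n + 1 + 1) cs') = pvAdjOne (pvUpIdx (n + 1 + 1) cs') := by
            cases hl : pvUpIdx (n + 1 + 1) cs' with
            | nil => simp [pvAdjOne]
            | cons m t =>
              have hm : n + 1 + 1 ≤ m := pvUpIdx_ge cs' _ m (by rw [hl]; exact List.mem_cons_self)
              have hne : ¬ (m - n == 1) = true := by simp; omega
              simp [pvAdjOne, hne]
          have ihd := ih (n + 1)
          simp only [pvUpIdx] at ihd ⊢
          rw [if_neg hd] at ihd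
          rw [if_pos hc, if_neg hd, hrec, ihd]
          simp [pvAdjUp, hd]
    · have ihd := ih (n + 1)
      simp only [pvUpIdx] at ihd ⊢
      rw [if_neg hc, ihd]
      cases cs with
      | nil => simp [pvAdjUp]
      | cons d cs' => simp [pvAdjUp, hc]

theorem is_pascal_case_eq_alt (name : String) : is_pascal_case name = is_pascal_case_alt name := by
  unfold is_pascal_case is_pascal_case_alt
  cases h : PySem.Str.pyGet? name 0 with
  | none => rfl
  | some c =>
    cases hg : (PySem.Chars.upperChar c == c) with
    | false => simp [bne, hg]
    | true =>
      simp only [bne, hg, Bool.not_true, Bool.false_eq_true, if_false]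
      rw [pvFoldl_upIdx name.toList 0 [], List.nil_append, pvAdjOne_upIdx name.toList 0]
      change (if pvAdjUp name.toList then false else true) = !pvAdjUp name.toList
      cases pvAdjUp name.toList <;> simp

-- ===== VERDICT (by name: the statement is the Claim_ definition above) =====
theorem is_pascal_case_spec : Claim_equal_is_pascal_case := by
  intro name _ _
  exact is_pascal_case_eq_alt name
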